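-- pv_equiv track=rewrite | github.com/MaxMCannon/Advent2023 | 2015/Day5.py | checkvowels
-- ===== SOURCE A (Python) =====
-- vowels = ['a', 'e', 'i', 'u', 'o']
--
-- def checkvowels(s):
--     outmap = {}
--     sum = 0
--     for c in s:
--         outmap[c] = outmap.setdefault(c, 0) + 1
--     for v in vowels:
--         if v in outmap.keys():
--             sum += outmap.get(v)
--     if sum >= 3:
--         return True
--     return False
-- ===== SOURCE B (Python) =====
-- def checkvowels(s):
--     return sum(1 for c in s if c in "aeiou") >= 3
-- ===== Notes on version B (the rewrite author's own statement) =====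
-- stated objective: simpler
-- what changed: B replaces A's two-phase build-a-frequency-dict-then-scan-the-vowel-list structure with a single direct pass keeping one running vowel counter.
import Mathlib
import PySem

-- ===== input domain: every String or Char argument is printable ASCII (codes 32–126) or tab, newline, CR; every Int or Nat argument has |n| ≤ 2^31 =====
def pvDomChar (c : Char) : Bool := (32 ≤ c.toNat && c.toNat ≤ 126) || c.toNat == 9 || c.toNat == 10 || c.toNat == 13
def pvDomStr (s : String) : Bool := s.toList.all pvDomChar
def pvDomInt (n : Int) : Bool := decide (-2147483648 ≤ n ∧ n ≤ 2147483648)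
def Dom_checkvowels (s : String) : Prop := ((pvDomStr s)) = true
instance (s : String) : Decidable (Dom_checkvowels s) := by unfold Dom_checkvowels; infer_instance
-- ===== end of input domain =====

-- ===== PORT A =====
-- B is a single-pass count; A builds a per-character frequency dict first. Equivalence proved on Dom.
def vowelsA : List Char := ['a', 'e', 'i', 'u', 'o']

-- outmap[c] = outmap.setdefault(c, 0) + 1
def stepA (d : PySem.Dict Char Int) (c : Char) : PySem.Dict Char Int :=
  let d1 := d.setdefault c 0
  d1.insert c (d1.getD c 0 + 1)

def checkvowels (s : String) : Bool :=
  let outmap := s.toList.foldl stepA (PySem.Dict.empty : PySem.Dict Char Int)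
  -- 'sum += outmap.get(v)': guarded by 'v in outmap.keys()', so get(v) is the stored value
  let sum := vowelsA.foldl (fun acc v => if outmap.contains v then acc + outmap.getD v 0 else acc) (0 : Int)
  if sum ≥ 3 then true else false

-- ===== PORT B =====
def checkvowels_alt (s : String) : Bool :=
  decide (s.toList.foldl (fun t c => if "aeiou".toList.contains c then t + 1 else t) (0 : Int) ≥ 3)

-- ===== PRECONDITION & SPEC =====
def Spec_checkvowels (s : String) (out : Bool) : Prop := out = checkvowels_alt s
instance (s : String) (out : Bool) : Decidable (Spec_checkvowels s out) := by unfold Spec_checkvowels; infer_instance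

-- ===== CLAIM (what is proved, stated in full; the proofs are below) =====
def Claim_equal_checkvowels : Prop := ∀ (s : String), Dom_checkvowels s → Spec_checkvowels s (checkvowels s)

-- ===== LEMMAS AND PROOFS =====

-- A's dict-building loop counts occurrences
theorem build_getD (l : List Char) (d : PySem.Dict Char Int) (v : Char) :
    (l.foldl stepA d).getD v 0 = d.getD v 0 + (l.count v : Int) := by
  induction l generalizing d with
  | nil => simp
  | cons c t ih =>
    rw [List.foldl_cons, ih]
    have h2 : (stepA d c).getD v 0 = d.getD v 0 + (if v = c then 1 else 0) := by
      unfold stepA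
      simp only [PySem.Dict.getD_insert]
      by_cases h : v = c
      · simp [h, PySem.Dict.getD_setdefault_self]
      · simp only [h, if_false, PySem.Dict.getD_eq_get?_getD]
        rw [PySem.Dict.get?_setdefault_of_ne (hne := h), add_zero]
    rw [h2, List.count_cons]
    by_cases h : v = c
    · subst h; simp; ring
    · have hcv : ¬((c == v) = true) := by
        simp only [beq_iff_eq]; exact fun hc => h hc.symm
      rw [if_neg h, if_neg hcv]
      push_cast; ring

-- B's counting loop
theorem bloop (l : List Char) (t : Int) :
    l.foldl (fun t c => if "aeiou".toList.contains c then t + 1 else t) t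
      = t + (l.countP (fun c => "aeiou".toList.contains c) : Int) := by
  induction l generalizing t with
  | nil => simp
  | cons c r ih =>
    rw [List.foldl_cons, List.countP_cons]
    by_cases h : "aeiou".toList.contains c
    · rw [if_pos h, ih, if_pos h]; push_cast; ring
    · rw [if_neg h, ih, if_neg h]; push_cast; ring

theorem countP_vowels (l : List Char) :
    (l.countP (fun c => "aeiou".toList.contains c) : Int)
      = l.count 'a' + l.count 'e' + l.count 'i' + l.count 'u' + l.count 'o' := by
  simp only [show "aeiou".toList = ['a', 'e', 'i', 'o', 'u'] from rfl]
  induction l with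
  | nil => simp
  | cons c t ih =>
    rw [List.countP_cons, List.count_cons, List.count_cons, List.count_cons,
        List.count_cons, List.count_cons]
    push_cast
    rw [ih]
    by_cases ha : c = 'a' <;> by_cases he : c = 'e' <;> by_cases hi : c = 'i' <;>
      by_cases hu : c = 'u' <;> by_cases ho : c = 'o' <;>
      simp [ha, he, hi, hu, ho] <;> omega

theorem sum_loop_eq (d : PySem.Dict Char Int) (acc : Int) :
    vowelsA.foldl (fun acc v => if d.contains v then acc + d.getD v 0 else acc) acc
      = acc + d.getD 'a' 0 + d.getD 'e' 0 + d.getD 'i' 0 + d.getD 'u' 0 + d.getD 'o' 0 := by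
  have key : ∀ v : Char, ∀ a : Int,
      (if d.contains v then a + d.getD v 0 else a) = a + d.getD v 0 := by
    intro v a
    by_cases h : d.contains v
    · simp [h]
    · have h0 : d.getD v 0 = 0 :=
        PySem.Dict.getD_of_not_contains d 0 (by simpa using h)
      rw [if_neg h, h0, add_zero]
  simp [vowelsA, List.foldl_cons, key]

-- ===== VERDICT (by name: the statement is the Claim_ definition above) =====
theorem checkvowels_spec : Claim_equal_checkvowels := by
  intro s _
  unfold Spec_checkvowels checkvowels checkvowels_alt
  simp only [sum_loop_eq]
  simp only [bloop, countP_vowels, build_getD, PySem.Dict.getD_empty]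
  split <;> simp_all
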